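-- pv_equiv track=rewrite | github.com/rajharsh72/hr-dsa-pattern | questions/sliding_window/max_points_from_cards.py | max_points_from_cards
-- ===== SOURCE A (Python) =====
-- def max_points_from_cards(cards, k):
--     leftSum = rightSum = maxSum = 0
--     rightIndex = len(cards) - 1
--     for i in range(0,k):
--         leftSum += cards[i]
--     maxSum = leftSum
--
--     for i in range(k-1, -1,-1):
--         leftSum -= cards[i]
--         rightSum += cards[rightIndex]
--         rightIndex -= 1
--         maxSum = max(maxSum, rightSum + leftSum)
--     return maxSum
-- ===== SOURCE B (Python) =====
-- def max_points_from_cards(cards, k):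
--     if k <= 0:
--         return 0
--     n = len(cards)
--     left = [0]
--     for i in range(0, k):
--         left.append(left[-1] + cards[i])
--     right = [0]
--     for i in range(0, k):
--         right.append(right[-1] + cards[n - 1 - i])
--     best = left[0] + right[k]
--     for j in range(1, k + 1):
--         best = max(best, left[j] + right[k - j])
--     return best
-- ===== Notes on version B (the rewrite author's own statement) =====
-- stated objective: alternative
-- what changed: Replaces A's in-place sliding window (running leftSum/rightSum/rightIndex mutated in one reverse loop) by precomputed prefix-sum and suffix-sum tables combined in a separate split-point pass.
import Mathlib
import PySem

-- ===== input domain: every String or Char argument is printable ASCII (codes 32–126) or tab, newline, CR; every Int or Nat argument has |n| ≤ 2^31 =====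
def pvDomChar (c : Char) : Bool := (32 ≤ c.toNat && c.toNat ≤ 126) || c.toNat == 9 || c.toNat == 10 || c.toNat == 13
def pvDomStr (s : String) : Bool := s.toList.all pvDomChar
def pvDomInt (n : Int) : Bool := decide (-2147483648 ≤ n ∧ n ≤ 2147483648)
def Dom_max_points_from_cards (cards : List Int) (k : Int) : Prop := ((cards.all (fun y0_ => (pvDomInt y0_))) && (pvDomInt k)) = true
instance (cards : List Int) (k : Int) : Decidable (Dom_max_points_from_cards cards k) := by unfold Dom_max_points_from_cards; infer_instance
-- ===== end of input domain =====

-- B replaces A's in-place sliding window by prefix-/suffix-sum tables combined over split points (alternative decomposition, same cost).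


-- ===== PORT A =====
-- the body of A's second loop: state (leftSum, rightSum, rightIndex, maxSum)
def pvStepA (cards : List Int) (st : Int × Int × Int × Int) (i : Int) : Int × Int × Int × Int :=
  let ls := st.1 - PySem.List.pyGetD cards i 0
  let rs := st.2.1 + PySem.List.pyGetD cards st.2.2.1 0
  (ls, rs, st.2.2.1 - 1, max st.2.2.2 (rs + ls))

def max_points_from_cards (cards : List Int) (k : Int) : Int :=
  let leftSum0 : Int :=
    (PySem.List.pyRange 0 k 1).foldl (fun s i => s + PySem.List.pyGetD cards i 0) 0
  let st :=
    (PySem.List.pyRange (k - 1) (-1) (-1)).foldl (pvStepA cards)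
      (leftSum0, 0, (cards.length : Int) - 1, leftSum0)
  st.2.2.2

-- ===== PORT B =====
def max_points_from_cards_alt (cards : List Int) (k : Int) : Int :=
  if k ≤ 0 then 0
  else
    let n : Int := (cards.length : Int)
    let left : List Int :=
      (PySem.List.pyRange 0 k 1).foldl
        (fun acc i => acc ++ [PySem.List.pyGetD acc (-1) 0 + PySem.List.pyGetD cards i 0]) [0]
    let right : List Int :=
      (PySem.List.pyRange 0 k 1).foldl
        (fun acc i => acc ++ [PySem.List.pyGetD acc (-1) 0 + PySem.List.pyGetD cards (n - 1 - i) 0]) [0]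
    let best := PySem.List.pyGetD left 0 0 + PySem.List.pyGetD right k 0
    (PySem.List.pyRange 1 (k + 1) 1).foldl
      (fun b j => max b (PySem.List.pyGetD left j 0 + PySem.List.pyGetD right (k - j) 0)) best

-- ===== PRECONDITION & SPEC =====
-- Pre_ excludes exactly k > len(cards), where Python A raises IndexError (cards[i] in the first loop).
def Pre_max_points_from_cards (cards : List Int) (k : Int) : Prop := k ≤ (cards.length : Int)
instance (cards : List Int) (k : Int) : Decidable (Pre_max_points_from_cards cards k) := by
  unfold Pre_max_points_from_cards; infer_instance

def pvWitness_max_points_from_cards : List Int × Int := ([1, 2, 3, 4], 2)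

def Spec_max_points_from_cards (cards : List Int) (k : Int) (out : Int) : Prop := out = max_points_from_cards_alt cards k
instance (cards : List Int) (k : Int) (out : Int) : Decidable (Spec_max_points_from_cards cards k out) := by unfold Spec_max_points_from_cards; infer_instance

-- ===== CLAIM (what is proved, stated in full; the proofs are below) =====
def Claim_equal_max_points_from_cards : Prop := ∀ (cards : List Int) (k : Int), Dom_max_points_from_cards cards k → Pre_max_points_from_cards cards k → Spec_max_points_from_cards cards k (max_points_from_cards cards k)

-- ===== LEMMAS AND PROOFS =====

-- prefix sum of the first j cards / sum of the last j cards
def pvPref (cards : List Int) (j : Nat) : Int := (cards.take j).sum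
def pvSuff (cards : List Int) (j : Nat) : Int := (cards.reverse.take j).sum

theorem pvPref_succ (cards : List Int) (j : Nat) (h : j < cards.length) :
    pvPref cards (j + 1) = pvPref cards j + cards[j] := by
  simpa [pvPref] using List.sum_take_succ cards j h

theorem pvSuff_succ (cards : List Int) (j : Nat) (h : j < cards.length) :
    pvSuff cards (j + 1) = pvSuff cards j + cards[cards.length - 1 - j] := by
  have h' : j < cards.reverse.length := by simpa using h
  have := List.sum_take_succ cards.reverse j h'
  simpa [pvSuff, List.getElem_reverse] using this

-- the running-max fold over candidate indices
def pvF (g : Nat → Int) (l : List Nat) (i : Int) : Int := l.foldl (fun a j => max a (g j)) i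

theorem pvF_init_max (g : Nat → Int) (l : List Nat) (a b : Int) :
    pvF g l (max a b) = max a (pvF g l b) := by
  induction l generalizing b with
  | nil => rfl
  | cons j t ih => simp only [pvF, List.foldl_cons, max_assoc]; exact ih _

theorem pvF_cons (g : Nat → Int) (j : Nat) (l : List Nat) (i : Int) :
    pvF g (j :: l) i = max (g j) (pvF g l i) := by
  have : pvF g (j :: l) i = pvF g l (max (g j) i) := by simp [pvF, max_comm]
  rw [this, pvF_init_max]

theorem pvF_reverse (g : Nat → Int) (l : List Nat) (i : Int) :
    pvF g l.reverse i = pvF g l i := by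
  induction l generalizing i with
  | nil => rfl
  | cons j t ih =>
    rw [List.reverse_cons, pvF_cons]
    simp only [pvF, List.foldl_append, List.foldl_cons, List.foldl_nil]
    rw [show (t.reverse.foldl (fun a j => max a (g j)) i) = pvF g t.reverse i from rfl, ih]
    exact max_comm _ _

theorem pvF_le_of_mem (g : Nat → Int) (l : List Nat) (i : Int) (j : Nat) (hj : j ∈ l) :
    g j ≤ pvF g l i :=
  (PySem.List.le_foldl_max_int l g i).2 j hj

theorem pvF_init_swap (g : Nat → Int) (l : List Nat) (j j' : Nat) (hj : j ∈ l) (hj' : j' ∈ l) :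
    pvF g l (g j) = pvF g l (g j') := by
  calc pvF g l (g j)
      = max (g j') (pvF g l (g j)) := (max_eq_right (pvF_le_of_mem g l (g j) j' hj')).symm
    _ = pvF g l (max (g j') (g j)) := (pvF_init_max g l _ _).symm
    _ = pvF g l (max (g j) (g j')) := by rw [max_comm]
    _ = max (g j) (pvF g l (g j')) := pvF_init_max g l _ _
    _ = pvF g l (g j') := max_eq_right (pvF_le_of_mem g l (g j') j hj)

-- last element of a nonempty list via Python index -1
theorem pvGetD_neg_one {xs : List Int} (d : Int) (h : xs ≠ []) :
    PySem.List.pyGetD xs (-1) d = xs.getLast h := by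
  have h1 : 1 ≤ xs.length := List.length_pos_iff.mpr h
  have h2 : xs.length - 1 < xs.length := by omega
  simp [PySem.List.pyGetD, PySem.List.pyGet?, PySem.List.pyIdx?, h1,
    List.getElem?_eq_getElem h2, List.getLast_eq_getElem]

-- A's first loop accumulates the prefix sum
theorem pvLoop1 (cards : List Int) (m : Nat) (h : m ≤ cards.length) :
    (PySem.List.pyRange 0 (m : Int) 1).foldl (fun s i => s + PySem.List.pyGetD cards i 0) 0
      = pvPref cards m := by
  induction m with
  | zero => simp [pvPref]
  | succ m ih =>
    have hml : m < cards.length := by omega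
    rw [show ((m + 1 : Nat) : Int) = (m : Int) + 1 by push_cast; ring,
      PySem.List.pyRange_one_succ_right (by omega : (0:Int) ≤ (m:Int)),
      List.foldl_append, ih (by omega)]
    simp only [List.foldl_cons, List.foldl_nil, PySem.List.pyGetD_natCast,
      List.getD_eq_getElem cards 0 hml]
    exact (pvPref_succ cards m hml).symm

-- A's second loop: invariant over (left count m, right count c)
theorem pvLoop2 (cards : List Int) (m : Nat) : ∀ (c : Nat) (mx : Int), m + c ≤ cards.length →
    ((PySem.List.pyRange ((m : Int) - 1) (-1) (-1)).foldl (pvStepA cards)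
        (pvPref cards m, pvSuff cards c, (cards.length : Int) - 1 - (c : Int), mx)).2.2.2
      = pvF (fun j => pvPref cards j + pvSuff cards (c + m - j)) (List.range m).reverse mx := by
  induction m with
  | zero =>
    intro c mx h
    rw [PySem.List.pyRange_neg_one_eq_nil (by omega : ((0:Nat):Int) - 1 ≤ -1)]
    rfl
  | succ m ih =>
    intro c mx h
    have hml : m < cards.length := by omega
    have hcl : c < cards.length := by omega
    rw [show ((m + 1 : Nat) : Int) - 1 = (m : Int) by push_cast; ring,
      PySem.List.pyRange_neg_one_cons (by omega : (-1:Int) < (m:Int)), List.foldl_cons]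
    have e1 : pvStepA cards
        (pvPref cards (m+1), pvSuff cards c, (cards.length : Int) - 1 - (c : Int), mx) (m : Int)
        = (pvPref cards m, pvSuff cards (c+1), (cards.length : Int) - 1 - ((c+1 : Nat) : Int),
            max mx (pvSuff cards (c+1) + pvPref cards m)) := by
      have hidx : (cards.length : Int) - 1 - (c : Int) = ((cards.length - 1 - c : Nat) : Int) := by
        omega
      have hlt : cards.length - 1 - c < cards.length := by omega
      simp only [pvStepA, hidx, PySem.List.pyGetD_natCast,
        List.getD_eq_getElem cards 0 hml, List.getD_eq_getElem cards 0 hlt]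
      rw [pvPref_succ cards m hml, pvSuff_succ cards c hcl]
      simp only [Prod.mk.injEq]
      refine ⟨by ring, trivial, by push_cast; omega, by congr 1; ring⟩
    rw [e1, ih (c+1) _ (by omega)]
    have e2 : (fun j => pvPref cards j + pvSuff cards ((c+1) + m - j))
        = (fun j => pvPref cards j + pvSuff cards (c + (m+1) - j)) := by
      funext j; congr 2; omega
    rw [e2]
    have e3 : (List.range (m+1)).reverse = m :: (List.range m).reverse := by
      simp [List.range_succ]
    rw [e3]
    simp only [pvF, List.foldl_cons]
    congr 1
    have : c + (m + 1) - m = c + 1 := by omega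
    rw [this, add_comm]

theorem pvLoop2_zero (cards : List Int) (m : Nat) (mx : Int) (h : m ≤ cards.length) :
    ((PySem.List.pyRange ((m : Int) - 1) (-1) (-1)).foldl (pvStepA cards)
        (pvPref cards m, 0, (cards.length : Int) - 1, mx)).2.2.2
      = pvF (fun j => pvPref cards j + pvSuff cards (m - j)) (List.range m).reverse mx := by
  have h0 : (pvSuff cards 0) = (0 : Int) := rfl
  have := pvLoop2 cards m 0 mx (by omega)
  rw [h0] at this
  rw [show (cards.length : Int) - 1 - ((0:Nat) : Int) = (cards.length : Int) - 1 by push_cast; ring] at this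
  rw [this]
  congr 1
  funext j
  congr 2
  omega

-- A's value for k = m ≥ 0, m ≤ len: running max as pvF over reversed range
theorem portA_eq (cards : List Int) (m : Nat) (h : m ≤ cards.length) :
    max_points_from_cards cards (m : Int)
      = pvF (fun j => pvPref cards j + pvSuff cards (m - j)) (List.range (m + 1)).reverse
          (pvPref cards m + pvSuff cards 0) := by
  simp only [max_points_from_cards]
  rw [pvLoop1 cards m h, pvLoop2_zero cards m _ h]
  have e3 : (List.range (m+1)).reverse = m :: (List.range m).reverse := by
    simp [List.range_succ]
  rw [e3]
  simp only [pvF, List.foldl_cons]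
  congr 1
  have h0 : (pvSuff cards 0) = (0 : Int) := rfl
  have : m - m = 0 := by omega
  rw [this, h0]
  simp

-- B's left table is the list of prefix sums
theorem pvLeftList (cards : List Int) (m : Nat) (h : m ≤ cards.length) :
    (PySem.List.pyRange 0 (m : Int) 1).foldl
        (fun acc i => acc ++ [PySem.List.pyGetD acc (-1) 0 + PySem.List.pyGetD cards i 0]) [0]
      = (List.range (m + 1)).map (pvPref cards) := by
  induction m with
  | zero =>
    rw [show ((0:Nat):Int) = 0 from rfl, PySem.List.pyRange_one_eq_nil (le_refl 0)]
    simp [pvPref]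
  | succ m ih =>
    have hml : m < cards.length := by omega
    rw [show ((m + 1 : Nat) : Int) = (m : Int) + 1 by push_cast; ring,
      PySem.List.pyRange_one_succ_right (by omega : (0:Int) ≤ (m:Int)),
      List.foldl_append, ih (by omega), List.foldl_cons, List.foldl_nil]
    have hne : (List.range (m + 1)).map (pvPref cards) ≠ [] := by simp
    rw [pvGetD_neg_one 0 hne]
    have hlast : ((List.range (m + 1)).map (pvPref cards)).getLast hne = pvPref cards m := by
      rw [List.getLast_eq_getElem]
      simp
    rw [hlast, PySem.List.pyGetD_natCast, List.getD_eq_getElem cards 0 hml,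
      ← pvPref_succ cards m hml]
    rw [List.range_succ (n := m + 1), List.map_append]
    rfl

-- B's right table is the list of suffix sums
theorem pvRightList (cards : List Int) (m : Nat) (h : m ≤ cards.length) :
    (PySem.List.pyRange 0 (m : Int) 1).foldl
        (fun acc i => acc ++ [PySem.List.pyGetD acc (-1) 0
            + PySem.List.pyGetD cards ((cards.length : Int) - 1 - i) 0]) [0]
      = (List.range (m + 1)).map (pvSuff cards) := by
  induction m with
  | zero =>
    rw [show ((0:Nat):Int) = 0 from rfl, PySem.List.pyRange_one_eq_nil (le_refl 0)]
    simp [pvSuff]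
  | succ m ih =>
    have hml : m < cards.length := by omega
    rw [show ((m + 1 : Nat) : Int) = (m : Int) + 1 by push_cast; ring,
      PySem.List.pyRange_one_succ_right (by omega : (0:Int) ≤ (m:Int)),
      List.foldl_append, ih (by omega), List.foldl_cons, List.foldl_nil]
    have hne : (List.range (m + 1)).map (pvSuff cards) ≠ [] := by simp
    rw [pvGetD_neg_one 0 hne]
    have hlast : ((List.range (m + 1)).map (pvSuff cards)).getLast hne = pvSuff cards m := by
      rw [List.getLast_eq_getElem]
      simp
    have hidx : (cards.length : Int) - 1 - (m : Int) = ((cards.length - 1 - m : Nat) : Int) := by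
      omega
    have hlt : cards.length - 1 - m < cards.length := by omega
    rw [hlast, hidx, PySem.List.pyGetD_natCast, List.getD_eq_getElem cards 0 hlt,
      ← pvSuff_succ cards m hml]
    rw [List.range_succ (n := m + 1), List.map_append]
    rfl

-- B's value for k = m ≥ 1, m ≤ len
theorem portB_eq (cards : List Int) (m : Nat) (h1 : 1 ≤ m) (h : m ≤ cards.length) :
    max_points_from_cards_alt cards (m : Int)
      = pvF (fun j => pvPref cards j + pvSuff cards (m - j)) (List.range (m + 1))
          (pvPref cards 0 + pvSuff cards m) := by
  have hk : ¬ ((m : Int) ≤ 0) := by omega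
  simp only [max_points_from_cards_alt, if_neg hk]
  rw [pvLeftList cards m h, pvRightList cards m h]
  have hget : ∀ (f : Nat → Int) (t : Nat), t < m + 1 →
      PySem.List.pyGetD ((List.range (m + 1)).map f) ((t : Nat) : Int) 0 = f t := by
    intro f t ht
    rw [PySem.List.pyGetD_natCast, PySem.List.getD_map_range f (m+1) t 0 ht]
  have hb0 : PySem.List.pyGetD ((List.range (m + 1)).map (pvPref cards)) 0 0
      = pvPref cards 0 := by
    have := hget (pvPref cards) 0 (by omega)
    simpa using this
  have hbm : PySem.List.pyGetD ((List.range (m + 1)).map (pvSuff cards)) ((m : Nat) : Int) 0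
      = pvSuff cards m := hget (pvSuff cards) m (by omega)
  rw [hb0, hbm]
  rw [show ((m : Int) + 1) = (((m + 1 : Nat)) : Int) by push_cast; ring]
  rw [PySem.List.pyRange_one, show (((m + 1 : Nat) : Int) - 1).toNat = m by omega,
    List.foldl_map]
  have hcong : List.foldl
      (fun (b : Int) (t : Nat) =>
        max b
          (PySem.List.pyGetD ((List.range (m + 1)).map (pvPref cards)) (1 + (t : Int)) 0 +
            PySem.List.pyGetD ((List.range (m + 1)).map (pvSuff cards)) ((m : Int) - (1 + (t : Int))) 0))
      (pvPref cards 0 + pvSuff cards m) (List.range m)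
      = List.foldl (fun (b : Int) (t : Nat) => max b (pvPref cards (t + 1) + pvSuff cards (m - (t + 1))))
          (pvPref cards 0 + pvSuff cards m) (List.range m) := by
    apply PySem.List.foldl_congr_mem
    intro b t ht
    have htm : t < m := by simpa using ht
    have e1 : (1 : Int) + (t : Int) = (((t + 1 : Nat)) : Int) := by push_cast; ring
    rw [e1]
    rw [show (m : Int) - (((t + 1 : Nat)) : Int) = (((m - (t + 1) : Nat)) : Int) by push_cast; omega]
    rw [hget (pvPref cards) (t+1) (by omega), hget (pvSuff cards) (m - (t+1)) (by omega)]
  rw [hcong]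
  rw [show List.range (m + 1) = 0 :: (List.range m).map Nat.succ from List.range_succ_eq_map]
  simp only [pvF, List.foldl_cons, List.foldl_map, Nat.succ_eq_add_one, Nat.sub_zero, max_self]

-- ===== VERDICT (by name: the statement is the Claim_ definition above) =====
theorem max_points_from_cards_spec : Claim_equal_max_points_from_cards := by
  intro cards k _ hpre
  unfold Spec_max_points_from_cards
  by_cases hk : k ≤ 0
  · have h1 : PySem.List.pyRange 0 k 1 = [] := PySem.List.pyRange_one_eq_nil hk
    have h2 : PySem.List.pyRange (k - 1) (-1) (-1) = [] :=
      PySem.List.pyRange_neg_one_eq_nil (by omega)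
    simp [max_points_from_cards, max_points_from_cards_alt, h1, h2, hk]
  · have hm : k = ((k.toNat : Nat) : Int) := by omega
    set m := k.toNat with hmdef
    have h1m : 1 ≤ m := by omega
    have hlen : m ≤ cards.length := by
      unfold Pre_max_points_from_cards at hpre; omega
    rw [hm, portA_eq cards m hlen, portB_eq cards m h1m hlen, pvF_reverse]
    have hk0 : (0 : Nat) ∈ List.range (m + 1) := by simp
    have hkk : m ∈ List.range (m + 1) := by simp
    have := pvF_init_swap (fun j => pvPref cards j + pvSuff cards (m - j))
      (List.range (m + 1)) m 0 hkk hk0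
    simpa using this
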